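-- pv_equiv track=rewrite | github.com/Judi-fr/curso-python | ejercicios simples/Ejercicios simples/Challenge114 Hex_Word_Sum.py | str2int_1
-- ===== SOURCE A (Python) =====
-- def str2int_1(text):
--     y=list()
--     for c in text:
--         x=list()
--         for z in str(hex(ord(c))):
--             if z.isdecimal():
--                 x.append(int(z))
--         y.append(sum(x))
--     return (sum(y))
-- ===== SOURCE B (Python) =====
-- def str2int_1(text):
--     total = 0
--     for c in text:
--         n = ord(c)
--         while n:
--             d = n % 16
--             if d < 10:
--                 total += d
--             n //= 16
--     return total
-- ===== Notes on version B (the rewrite author's own statement) =====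
-- stated objective: faster
-- what changed: Replaces building hex strings per character and string-scanning for decimal digits with direct base-16 digit extraction by modulo/division into one running total.
import Mathlib
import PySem

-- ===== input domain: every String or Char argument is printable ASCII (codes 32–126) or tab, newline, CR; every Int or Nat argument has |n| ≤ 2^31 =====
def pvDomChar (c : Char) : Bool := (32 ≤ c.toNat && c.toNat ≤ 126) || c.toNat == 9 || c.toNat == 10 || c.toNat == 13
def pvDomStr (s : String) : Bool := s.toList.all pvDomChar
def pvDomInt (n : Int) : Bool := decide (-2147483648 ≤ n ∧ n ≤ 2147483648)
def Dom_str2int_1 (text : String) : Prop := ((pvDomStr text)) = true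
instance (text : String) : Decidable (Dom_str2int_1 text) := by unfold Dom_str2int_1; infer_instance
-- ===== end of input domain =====

-- B replaces per-character hex-string construction and decimal-digit scanning by arithmetic base-16 digit extraction (constant-factor faster).


-- ===== PORT A =====
-- hex digit character, as CPython prints it (lowercase)
def pvHexDigit (d : Nat) : Char := if d < 10 then Char.ofNat (48 + d) else Char.ofNat (87 + d)

-- the digits of hex(n) after the '0x' prefix (exact for n ≥ 0); fuel only makes the
-- recursion structural, fuel = n always suffices since n/16 < n
def pvHexDigitsAux : Nat → Nat → List Char
  | 0, _ => []
  | fuel + 1, n => if n = 0 then [] else pvHexDigitsAux fuel (n / 16) ++ [pvHexDigit (n % 16)]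

def pvHexDigits (n : Nat) : List Char := if n = 0 then ['0'] else pvHexDigitsAux n n

-- str(hex(n)) as a list of characters
def pvHexStr (n : Nat) : List Char := '0' :: 'x' :: pvHexDigits n

def str2int_1 (text : String) : Int :=
  let y := text.toList.foldl (fun y c =>
    let x := (pvHexStr c.toNat).foldl (fun x z =>
      -- z.isdecimal / int(z): exact here, every character of a hex string is ASCII
      if '0' ≤ z ∧ z ≤ '9' then x ++ [((z.toNat - 48 : Nat) : Int)] else x) []
    y ++ [x.sum]) []
  y.sum

-- ===== PORT B =====
-- the while loop of B: strip base-16 digits off n, adding those below 10 to total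
-- (fuel only makes the recursion structural; fuel = n always suffices since n/16 < n)
def pvGoAux : Nat → Nat → Int → Int
  | 0, _, total => total
  | fuel + 1, n, total =>
    if n = 0 then total
    else pvGoAux fuel (n / 16) (if n % 16 < 10 then total + ((n % 16 : Nat) : Int) else total)

def pvGo (n : Nat) (total : Int) : Int := pvGoAux n n total

def str2int_1_alt (text : String) : Int :=
  text.toList.foldl (fun total c => pvGo c.toNat total) 0

-- ===== PRECONDITION & SPEC =====
def Spec_str2int_1 (text : String) (out : Int) : Prop := out = str2int_1_alt text
instance (text : String) (out : Int) : Decidable (Spec_str2int_1 text out) := by unfold Spec_str2int_1; infer_instance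

-- ===== CLAIM (what is proved, stated in full; the proofs are below) =====
def Claim_equal_str2int_1 : Prop := ∀ (text : String), Dom_str2int_1 text → Spec_str2int_1 text (str2int_1 text)

-- ===== LEMMAS AND PROOFS =====
-- A's per-character contribution
def pvAChar (c : Char) : Int :=
  ((pvHexStr c.toNat).foldl (fun x z =>
    if '0' ≤ z ∧ z ≤ '9' then x ++ [((z.toNat - 48 : Nat) : Int)] else x) []).sum

lemma pvA_fold (l : List Char) (acc : List Int) :
    (l.foldl (fun y c =>
      y ++ [((pvHexStr c.toNat).foldl (fun x z =>
        if '0' ≤ z ∧ z ≤ '9' then x ++ [((z.toNat - 48 : Nat) : Int)] else x) []).sum]) acc).sum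
    = acc.sum + (l.map pvAChar).sum := by
  induction l generalizing acc with
  | nil => simp
  | cons c l ih =>
    rw [List.foldl_cons, ih]
    simp [pvAChar, List.sum_append]
    ring

lemma pvGoAux_shift (fuel n : Nat) (t : Int) : pvGoAux fuel n t = t + pvGoAux fuel n 0 := by
  induction fuel generalizing n t with
  | zero => simp [pvGoAux]
  | succ fuel ih =>
    by_cases h : n = 0
    · simp [pvGoAux, h]
    · rw [pvGoAux, pvGoAux, if_neg h, if_neg h,
        ih (n / 16) (if n % 16 < 10 then t + ((n % 16 : Nat) : Int) else t),
        ih (n / 16) (if n % 16 < 10 then (0 : Int) + ((n % 16 : Nat) : Int) else 0)]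
      split_ifs <;> ring

lemma pvGo_shift (n : Nat) (t : Int) : pvGo n t = t + pvGo n 0 := pvGoAux_shift n n t

lemma pvB_fold (l : List Char) (t : Int) :
    l.foldl (fun total c => pvGo c.toNat total) t
    = t + (l.map (fun c => pvGo c.toNat 0)).sum := by
  induction l generalizing t with
  | nil => simp
  | cons c l ih =>
    simp [List.foldl_cons, ih, pvGo_shift c.toNat t]
    ring

lemma pvChar_eq : ∀ n : Nat, n < 127 → pvAChar (Char.ofNat n) = pvGo n 0 := by decide

theorem str2int_1_spec : Claim_equal_str2int_1 := by
  intro text hdom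
  unfold Spec_str2int_1 str2int_1 str2int_1_alt
  rw [pvB_fold]
  simp only [pvA_fold, List.sum_nil, zero_add]
  have hcong : ∀ c ∈ text.toList, pvAChar c = pvGo c.toNat 0 := by
    intro c hc
    have : pvDomChar c = true := by
      have := (List.all_eq_true.mp hdom) c hc
      exact this
    have hlt : c.toNat < 127 := by
      simp [pvDomChar] at this
      omega
    have h2 := pvChar_eq c.toNat hlt
    rwa [Char.ofNat_toNat] at h2
  rw [List.map_congr_left hcong]

-- ===== VERDICT (by name: the statement is the Claim_ definition above) =====
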